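-- pv_equiv track=rewrite | github.com/StrategyLogic/omen | src/omen/ui/view_model.py | _build_graph_edges
-- ===== SOURCE A (Python) =====
-- from typing import Any
--
-- def _build_graph_edges(result: dict[str, Any]) -> list[dict[str, Any]]:
--     timeline = result.get("timeline", [])
--     edges: list[dict[str, Any]] = []
--     previous = None
--     for snapshot in timeline:
--         current = f"step-{snapshot.get('step')}"
--         if previous is not None:
--             edges.append({"id": f"{previous}->{current}", "source": previous, "target": current})
--         previous = current
--     return edges
-- ===== SOURCE B (Python) =====
-- from typing import Any
--
-- def _build_graph_edges(result: dict[str, Any]) -> list[dict[str, Any]]: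
--     def edges_of(tl: list) -> list[dict[str, Any]]:
--         if len(tl) < 2:
--             return []
--         a = f"step-{tl[0].get('step')}"
--         b = f"step-{tl[1].get('step')}"
--         return [{"id": f"{a}->{b}", "source": a, "target": b}] + edges_of(tl[1:])
--     return edges_of(result.get("timeline", []))
-- ===== Notes on version B (the rewrite author's own statement) =====
-- stated objective: alternative
-- what changed: Replaces A's single-pass loop with a 'previous' accumulator by a structural recursion that, while at least two snapshots remain, emits the edge between the first two snapshots and recurses on the tail (no accumulator, no precomputed node list).
import Mathlib
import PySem

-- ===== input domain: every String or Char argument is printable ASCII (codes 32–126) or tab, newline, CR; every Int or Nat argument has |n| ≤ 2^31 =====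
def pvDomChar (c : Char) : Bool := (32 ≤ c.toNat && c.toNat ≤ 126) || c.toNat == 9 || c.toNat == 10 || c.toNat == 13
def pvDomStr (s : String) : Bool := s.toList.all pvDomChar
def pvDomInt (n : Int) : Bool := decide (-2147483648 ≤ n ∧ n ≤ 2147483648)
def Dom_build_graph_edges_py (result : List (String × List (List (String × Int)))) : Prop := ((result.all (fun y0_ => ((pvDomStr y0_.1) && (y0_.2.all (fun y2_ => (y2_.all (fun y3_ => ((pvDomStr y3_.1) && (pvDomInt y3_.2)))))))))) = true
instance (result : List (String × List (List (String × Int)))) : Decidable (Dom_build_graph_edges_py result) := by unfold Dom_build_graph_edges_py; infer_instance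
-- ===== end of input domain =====

-- B replaces A's single-pass loop with a `previous` accumulator by a structural
-- recursion emitting the edge of the first two snapshots and recursing on the tail
-- (alternative decomposition; same cost).

-- ===== PORT A =====
-- f"step-{snapshot.get('step')}" : dict lookup (first match) with default None, rendered as "None"
def pvStepId (snapshot : List (String × Int)) : String :=
  "step-" ++ (match List.lookup "step" snapshot with
              | some n => PySem.Int.toStr n
              | none => "None")

-- the dict literal {"id": …, "source": …, "target": …} in insertion order
def pvEdge (a b : String) : List (String × String) :=
  [("id", a ++ "->" ++ b), ("source", a), ("target", b)]

def build_graph_edges_py (result : List (String × List (List (String × Int)))) : List (List (String × String)) :=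
  let timeline := (List.lookup "timeline" result).getD []
  (timeline.foldl
    (fun (st : List (List (String × String)) × Option String) snapshot =>
      let current := pvStepId snapshot
      let edges := match st.2 with
        | some previous => st.1 ++ [pvEdge previous current]
        | none => st.1
      (edges, some current))
    ([], none)).1

-- ===== PORT B =====
-- the inner recursive helper edges_of: base case fewer than two snapshots,
-- otherwise the edge of the first two followed by the recursion on tl[1:]
def pvEdgesOf : List (List (String × Int)) → List (List (String × String))
  | a :: b :: rest => pvEdge (pvStepId a) (pvStepId b) :: pvEdgesOf (b :: rest)
  | _ => []

def build_graph_edges_py_alt (result : List (String × List (List (String × Int)))) : List (List (String × String)) :=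
  pvEdgesOf ((List.lookup "timeline" result).getD [])

-- ===== PRECONDITION & SPEC =====
def Spec_build_graph_edges_py (result : List (String × List (List (String × Int)))) (out : List (List (String × String))) : Prop := out = build_graph_edges_py_alt result
instance (result : List (String × List (List (String × Int)))) (out : List (List (String × String))) : Decidable (Spec_build_graph_edges_py result out) := by unfold Spec_build_graph_edges_py; infer_instance

-- ===== CLAIM (what is proved, stated in full; the proofs are below) =====
def Claim_equal_build_graph_edges_py : Prop := ∀ (result : List (String × List (List (String × Int)))), Dom_build_graph_edges_py result → Spec_build_graph_edges_py result (build_graph_edges_py result)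

-- ===== LEMMAS AND PROOFS =====

-- A's loop, once a previous snapshot s has been seen, produces exactly B's recursion on s :: ts.
theorem pv_fold_eq (ts : List (List (String × Int))) (s : List (String × Int))
    (acc : List (List (String × String))) :
    (ts.foldl
      (fun (st : List (List (String × String)) × Option String) snapshot =>
        (match st.2 with
         | some previous => st.1 ++ [pvEdge previous (pvStepId snapshot)]
         | none => st.1, some (pvStepId snapshot)))
      (acc, some (pvStepId s))).1
    = acc ++ pvEdgesOf (s :: ts) := by
  induction ts generalizing s acc with
  | nil => simp [pvEdgesOf]
  | cons c rest ih =>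
    simp only [List.foldl_cons]
    rw [ih]
    simp [pvEdgesOf]

-- ===== VERDICT (by name: the statement is the Claim_ definition above) =====
theorem build_graph_edges_py_spec : Claim_equal_build_graph_edges_py := by
  intro result _
  unfold Spec_build_graph_edges_py build_graph_edges_py build_graph_edges_py_alt
  cases h : (List.lookup "timeline" result).getD [] with
  | nil => simp [pvEdgesOf]
  | cons s rest =>
    simp only [List.foldl_cons]
    rw [pv_fold_eq]
    simp
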